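-- pv_equiv track=rewrite | github.com/hjc2/WhileAckermann | ackermann.py | MVALUE
-- ===== SOURCE A (Python) =====
-- def ADD(x, y):
--     for i in range(y):
--         x = x + 1
--     return(x)
--
-- def MULT(x, y):
--     z = 0
--     for i in range(y):
--         z = ADD(z,x)
--     return(z)
--
-- def SUB(x,y):
--     for i in range(y):
--         if(x != 0):
--             x = x - 1
--     return(x)
--
-- def DIV(x, y):
--
--     time = x
--     z = 0
--     for i in range(time):
--         if(x == 0):
--             x = 0
--         else:
--             f = y - 1
--             n = SUB(x, f)
--             if(n == 0):
--                 x = 0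
--             else:
--                 x = SUB(x, y)
--                 z = z + 1
--     return(z)
--
-- def MVALUE(x):
--     time = x
--     z = 0
--     r = 10
--     for i in range(time):
--         x = DIV(x,10)
--         if(x == 0):
--             x = x
--         else:
--             z = z + 1
--     for i in range(z):
--         r = MULT(r, 10)
--     return(r)
-- ===== SOURCE B (Python) =====
-- def MVALUE(x):
--     # Smallest power of ten strictly greater than x, starting from 10:
--     # equals 10 ** (number of decimal digits of x) for x > 0, and 10 for x <= 0,
--     # exactly as A computes via its unary ADD/SUB/DIV/MULT loops.
--     p = 10
--     while x >= p:
--         p *= 10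
--     return p
-- ===== Notes on version B (the rewrite author's own statement) =====
-- stated objective: faster
-- what changed: Replaces A's unary-arithmetic simulation (DIV/MULT built from repeated increment/decrement loops, driven x times) by a single multiply-by-10 loop that finds the smallest power of ten exceeding x.
import Mathlib
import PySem

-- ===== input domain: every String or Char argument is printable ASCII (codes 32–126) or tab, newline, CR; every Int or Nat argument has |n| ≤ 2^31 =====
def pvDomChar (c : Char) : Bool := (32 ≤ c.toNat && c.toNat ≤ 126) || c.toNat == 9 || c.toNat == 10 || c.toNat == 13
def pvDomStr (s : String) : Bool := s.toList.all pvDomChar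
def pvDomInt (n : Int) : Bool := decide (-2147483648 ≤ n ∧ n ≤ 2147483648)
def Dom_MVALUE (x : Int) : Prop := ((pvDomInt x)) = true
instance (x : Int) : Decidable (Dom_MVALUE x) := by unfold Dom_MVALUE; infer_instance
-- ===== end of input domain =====

-- B replaces A's unary-arithmetic loops by a multiply-by-10 search for the
-- smallest power of ten exceeding x (measured asymptotically faster).

-- ===== PORT A =====
def ADD (x y : Int) : Int :=
  (PySem.List.pyRange 0 y 1).foldl (fun a _ => a + 1) x

def MULT (x y : Int) : Int :=
  (PySem.List.pyRange 0 y 1).foldl (fun z _ => ADD z x) 0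

def SUB (x y : Int) : Int :=
  (PySem.List.pyRange 0 y 1).foldl (fun a _ => if a ≠ 0 then a - 1 else a) x

def DIV (x y : Int) : Int :=
  let time := x
  ((PySem.List.pyRange 0 time 1).foldl (fun (s : Int × Int) _ =>
      if s.1 = 0 then (0, s.2)
      else
        let f := y - 1
        let n := SUB s.1 f
        if n = 0 then (0, s.2)
        else (SUB s.1 y, s.2 + 1)) (x, 0)).2

def MVALUE (x : Int) : Int :=
  let time := x
  let s := (PySem.List.pyRange 0 time 1).foldl (fun (s : Int × Int) _ =>
      let x' := DIV s.1 10
      if x' = 0 then (x', s.2) else (x', s.2 + 1)) (x, 0)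
  (PySem.List.pyRange 0 s.2 1).foldl (fun r _ => MULT r 10) 10

-- ===== PORT B =====
-- 'while x >= p: p *= 10'; the positivity argument only justifies termination.
def altLoop (x p : Int) (hp : 0 < p) : Int :=
  if h : p ≤ x then altLoop x (p * 10) (by omega) else p
termination_by (x + 1 - p).toNat
decreasing_by omega

def MVALUE_alt (x : Int) : Int := altLoop x 10 (by norm_num)

-- ===== PRECONDITION & SPEC =====
def Spec_MVALUE (x : Int) (out : Int) : Prop := out = MVALUE_alt x
instance (x : Int) (out : Int) : Decidable (Spec_MVALUE x out) := by unfold Spec_MVALUE; infer_instance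

-- ===== CLAIM (what is proved, stated in full; the proofs are below) =====
def Claim_equal_MVALUE : Prop := ∀ (x : Int), Dom_MVALUE x → Spec_MVALUE x (MVALUE x)

-- ===== LEMMAS AND PROOFS =====

-- a fold that ignores the list elements is an iterate of the step function
theorem foldl_const_iterate {α β : Type} (l : List β) (f : α → β → α) (g : α → α)
    (h : ∀ a b, f a b = g a) (s : α) : l.foldl f s = g^[l.length] s := by
  induction l generalizing s with
  | nil => rfl
  | cons b t ih => simp [List.foldl, h, ih, Function.iterate_succ_apply]

theorem iterate_add_one (n : Nat) (x : Int) :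
    (fun a : Int => a + 1)^[n] x = x + n := by
  induction n generalizing x with
  | zero => simp
  | succ n ih => rw [Function.iterate_succ_apply, ih]; push_cast; ring

theorem ADD_eq (x y : Int) : ADD x y = x + y.toNat := by
  unfold ADD
  rw [foldl_const_iterate _ (fun (a : Int) (_ : Int) => a + 1) (fun a : Int => a + 1)
      (fun _ _ => rfl), PySem.List.length_pyRange_one, iterate_add_one]
  omega

-- the body of SUB's loop, as a named step function
def sstep (a : Int) : Int := if a ≠ 0 then a - 1 else a

theorem sstep_iter (n : Nat) (x : Int) (hx : 0 ≤ x) :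
    sstep^[n] x = max (x - n) 0 := by
  induction n generalizing x with
  | zero => simp only [Function.iterate_zero_apply, Nat.cast_zero]; omega
  | succ n ih =>
    rw [Function.iterate_succ_apply]
    by_cases h : x = 0
    · subst h
      rw [show sstep 0 = 0 from by simp [sstep], ih 0 le_rfl]
      omega
    · rw [show sstep x = x - 1 from by simp [sstep, h], ih (x - 1) (by omega)]
      omega

theorem SUB_eq (x y : Int) (hx : 0 ≤ x) : SUB x y = max (x - y.toNat) 0 := by
  show (PySem.List.pyRange 0 y 1).foldl (fun a _ => sstep a) x = max (x - y.toNat) 0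
  rw [foldl_const_iterate _ _ sstep (fun _ _ => rfl), PySem.List.length_pyRange_one,
      sstep_iter _ _ hx]
  omega

theorem iterate_add_const (c : Int) (n : Nat) (z : Int) :
    (fun a : Int => a + c)^[n] z = z + n * c := by
  induction n generalizing z with
  | zero => simp
  | succ n ih => rw [Function.iterate_succ_apply, ih]; push_cast; ring

theorem MULT10_eq (r : Int) (hr : 0 ≤ r) : MULT r 10 = 10 * r := by
  unfold MULT
  rw [foldl_const_iterate _ (fun (z : Int) (_ : Int) => ADD z r) (fun z : Int => ADD z r)
      (fun _ _ => rfl), PySem.List.length_pyRange_one]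
  have h : (fun z : Int => ADD z r) = (fun z : Int => z + r) := by
    funext z; rw [ADD_eq]; omega
  rw [h, iterate_add_const]
  norm_num

-- the body of DIV's loop (for y = 10), as a named step function
def dstep (s : Int × Int) : Int × Int :=
  if s.1 = 0 then (0, s.2)
  else
    let f := (10 : Int) - 1
    let n := SUB s.1 f
    if n = 0 then (0, s.2)
    else (SUB s.1 10, s.2 + 1)

theorem dstep_iter (n : Nat) (x z : Int) (hx : 0 ≤ x) (hn : x ≤ n) :
    dstep^[n] (x, z) = (0, z + x / 10) := by
  induction n generalizing x z with
  | zero =>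
    have hx0 : x = 0 := by omega
    subst hx0; simp
  | succ n ih =>
    rw [Function.iterate_succ_apply]
    by_cases h0 : x = 0
    · subst h0
      rw [show dstep (0, z) = (0, z) from by simp [dstep]]
      rw [ih 0 z le_rfl (by omega)]
    · by_cases h9 : x ≤ 9
      · have hs : SUB x 9 = 0 := by rw [SUB_eq _ _ hx]; omega
        rw [show dstep (x, z) = (0, z) from by simp [dstep, h0, hs]]
        rw [ih 0 z le_rfl (by omega)]
        have hdiv : x / 10 = 0 := by omega
        rw [hdiv]
        norm_num
      · have hs : SUB x 9 ≠ 0 := by rw [SUB_eq _ _ hx]; omega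
        have hs10 : SUB x 10 = x - 10 := by rw [SUB_eq _ _ hx]; omega
        rw [show dstep (x, z) = (SUB x 10, z + 1) from by simp [dstep, h0, hs]]
        rw [hs10, ih (x - 10) (z + 1) (by omega) (by omega)]
        simp only [Prod.mk.injEq]
        exact ⟨trivial, by omega⟩

theorem DIV10_eq (x : Int) (hx : 0 ≤ x) : DIV x 10 = x / 10 := by
  show ((PySem.List.pyRange 0 x 1).foldl (fun (s : Int × Int) _ => dstep s) (x, 0)).2 = x / 10
  rw [foldl_const_iterate _ _ dstep (fun _ _ => rfl), PySem.List.length_pyRange_one,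
      dstep_iter (x - 0).toNat x 0 hx (by omega)]
  norm_num

-- number of divisions by 10 down to a one-digit number (= number of digits − 1)
def Lc (n : Nat) : Nat :=
  if n < 10 then 0 else Lc (n / 10) + 1
termination_by n
decreasing_by omega

theorem Lc_small {n : Nat} (h : n < 10) : Lc n = 0 := by
  rw [Lc.eq_def, if_pos h]

theorem Lc_big {n : Nat} (h : ¬ n < 10) : Lc n = Lc (n / 10) + 1 := by
  rw [Lc.eq_def, if_neg h]

-- the body of MVALUE's first loop, as a named step function
def mstep (s : Int × Int) : Int × Int :=
  let x' := DIV s.1 10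
  if x' = 0 then (x', s.2) else (x', s.2 + 1)

theorem mstep_iter (n : Nat) (x z : Int) (hx : 0 ≤ x) (hn : x ≤ n) :
    mstep^[n] (x, z) = (0, z + Lc x.toNat) := by
  induction n generalizing x z with
  | zero =>
    have hx0 : x = 0 := by omega
    subst hx0
    simp [Lc_small]
  | succ n ih =>
    rw [Function.iterate_succ_apply]
    by_cases h9 : x ≤ 9
    · have hd : DIV x 10 = 0 := by rw [DIV10_eq _ hx]; omega
      rw [show mstep (x, z) = (0, z) from by simp [mstep, hd]]
      rw [ih 0 z le_rfl (by omega)]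
      rw [show Lc (Int.toNat 0) = 0 from Lc_small (by omega),
          show Lc x.toNat = 0 from Lc_small (by omega)]
    · have hd : DIV x 10 = x / 10 := DIV10_eq _ hx
      have hne : x / 10 ≠ 0 := by omega
      rw [show mstep (x, z) = (x / 10, z + 1) from by simp [mstep, hd, hne]]
      rw [ih (x / 10) (z + 1) (by omega) (by omega)]
      have ht : (x / 10).toNat = x.toNat / 10 := by omega
      rw [ht, Lc_big (by omega : ¬ x.toNat < 10)]
      simp only [Prod.mk.injEq]
      exact ⟨trivial, by push_cast; ring⟩

theorem rpow_iter (n : Nat) : (fun r => MULT r 10)^[n] 10 = 10 * 10 ^ n := by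
  induction n with
  | zero => simp
  | succ n ih =>
    rw [Function.iterate_succ_apply', ih, MULT10_eq _ (by positivity)]
    ring

theorem MVALUE_closed (x : Int) (hx : 0 ≤ x) : MVALUE x = 10 * 10 ^ Lc x.toNat := by
  show (PySem.List.pyRange 0
      (((PySem.List.pyRange 0 x 1).foldl (fun (s : Int × Int) _ => mstep s) (x, 0)).2) 1).foldl
      (fun r _ => MULT r 10) 10 = 10 * 10 ^ Lc x.toNat
  rw [foldl_const_iterate _ _ mstep (fun _ _ => rfl), PySem.List.length_pyRange_one,
      mstep_iter (x - 0).toNat x 0 hx (by omega)]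
  rw [foldl_const_iterate _ (fun (r : Int) (_ : Int) => MULT r 10) (fun r : Int => MULT r 10)
      (fun _ _ => rfl), PySem.List.length_pyRange_one, rpow_iter]
  simp

theorem MVALUE_neg (x : Int) (hx : x < 0) : MVALUE x = 10 := by
  show (PySem.List.pyRange 0
      (((PySem.List.pyRange 0 x 1).foldl (fun (s : Int × Int) _ => mstep s) (x, 0)).2) 1).foldl
      (fun r _ => MULT r 10) 10 = 10
  rw [PySem.List.pyRange_one_eq_nil (by omega : x ≤ 0)]
  simp only [List.foldl_nil]
  have h2 : PySem.List.pyRange 0 ((x, (0 : Int)) : Int × Int).2 1 = [] :=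
    PySem.List.pyRange_one_eq_nil le_rfl
  rw [h2]
  rfl

theorem altLoop_mul (x : Int) (hx : 0 ≤ x) : ∀ (k : Nat) (p : Int) (hp : 0 < p)
    (hp10 : 0 < p * 10), (x - p).toNat ≤ k →
    altLoop x (p * 10) hp10 = 10 * altLoop (x / 10) p hp := by
  intro k
  induction k with
  | zero =>
    intro p hp hp10 hk
    have h : ¬ p * 10 ≤ x := by omega
    rw [altLoop.eq_def, dif_neg h, altLoop.eq_def, dif_neg (by omega : ¬ p ≤ x / 10)]
    ring
  | succ k ih =>
    intro p hp hp10 hk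
    by_cases h : p * 10 ≤ x
    · have hR : altLoop (x / 10) p hp = altLoop (x / 10) (p * 10) (by omega) := by
        rw [altLoop.eq_def, dif_pos (by omega : p ≤ x / 10)]
      rw [altLoop.eq_def, dif_pos h, hR]
      exact ih (p * 10) (by omega) (by omega) (by omega)
    · rw [altLoop.eq_def, dif_neg h, altLoop.eq_def, dif_neg (by omega : ¬ p ≤ x / 10)]
      ring

theorem altLoop_closed : ∀ (k : Nat) (x : Int) (hx : 0 ≤ x), x.toNat ≤ k →
    altLoop x 10 (by norm_num) = 10 * 10 ^ Lc x.toNat := by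
  intro k
  induction k with
  | zero =>
    intro x hx hk
    have hx0 : x = 0 := by omega
    subst hx0
    rw [altLoop.eq_def, dif_neg (by norm_num), Lc_small (by omega)]
    norm_num
  | succ k ih =>
    intro x hx hk
    by_cases h : (10 : Int) ≤ x
    · rw [altLoop.eq_def, dif_pos h]
      rw [altLoop_mul x hx (x - 10).toNat 10 (by norm_num) (by norm_num) (by omega)]
      rw [ih (x / 10) (by omega) (by omega)]
      have ht : (x / 10).toNat = x.toNat / 10 := by omega
      rw [ht, Lc_big (by omega : ¬ x.toNat < 10)]
      ring
    · rw [altLoop.eq_def, dif_neg h, Lc_small (by omega : x.toNat < 10)]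
      norm_num

-- ===== VERDICT (by name: the statement is the Claim_ definition above) =====
theorem MVALUE_spec : Claim_equal_MVALUE := by
  intro x _
  unfold Spec_MVALUE MVALUE_alt
  by_cases hx : 0 ≤ x
  · rw [MVALUE_closed x hx, altLoop_closed x.toNat x hx le_rfl]
  · rw [MVALUE_neg x (by omega), altLoop.eq_def, dif_neg (by omega)]
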